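-- pv_equiv track=rewrite | github.com/avidale/pushkin_rhyme | pushkin/rhyme.py | apostrophe2capital
-- ===== SOURCE A (Python) =====
-- def apostrophe2capital(word):
--     """ Transform 'п`ушка' to 'пУшка' """
--     result = ''
--     next_big = False
--     for letter in word:
--         if letter == '`':
--             next_big = True
--         else:
--             if next_big:
--                 letter = letter.upper()
--                 next_big = False
--             result = result + letter
--     return result
-- ===== SOURCE B (Python) =====
-- def apostrophe2capital(word):
--     """ Transform 'п`ушка' to 'пУшка' """
--     segments = word.split('`')
--     return segments[0] + ''.join(seg[:1].upper() + seg[1:] for seg in segments[1:])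
-- ===== Notes on version B (the rewrite author's own statement) =====
-- stated objective: simpler
-- what changed: Replaced the per-character next_big boolean state machine (with quadratic string concatenation) with a split on the backtick character followed by uppercasing the first character of every segment after the first and concatenating.
import Mathlib
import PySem

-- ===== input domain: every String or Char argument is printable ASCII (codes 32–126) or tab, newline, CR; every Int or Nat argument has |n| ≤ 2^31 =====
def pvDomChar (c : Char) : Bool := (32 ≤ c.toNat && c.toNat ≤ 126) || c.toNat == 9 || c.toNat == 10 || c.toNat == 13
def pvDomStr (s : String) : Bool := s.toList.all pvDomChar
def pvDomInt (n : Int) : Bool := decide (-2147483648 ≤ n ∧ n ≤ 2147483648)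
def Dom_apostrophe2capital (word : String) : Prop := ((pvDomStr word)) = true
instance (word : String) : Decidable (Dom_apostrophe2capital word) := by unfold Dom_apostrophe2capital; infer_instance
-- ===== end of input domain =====

-- B replaces A's per-character next_big state machine by splitting on '`' and
-- uppercasing the first character of each later segment (objective: simpler).

-- ===== PORT A =====
def apostrophe2capital (word : String) : String :=
  let st := word.toList.foldl
    (fun (st : String × Bool) letter =>
      if letter = '`' then (st.1, true)
      else
        let letter := if st.2 then PySem.Chars.upperChar letter else letter
        (st.1.push letter, false))
    ("", false)
  st.1

-- ===== PORT B =====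
-- seg[:1].upper() + seg[1:]
def pvCapFirst (seg : List Char) : List Char :=
  PySem.Chars.upper (PySem.Chars.slice seg none (some 1)) ++ PySem.Chars.slice seg (some 1) none

def apostrophe2capital_alt (word : String) : String :=
  let segments := PySem.Chars.splitOn word.toList ['`']
  String.ofList ((segments.headD []) ++ PySem.Chars.join [] ((segments.drop 1).map pvCapFirst))

-- ===== PRECONDITION & SPEC =====
def Spec_apostrophe2capital (word : String) (out : String) : Prop := out = apostrophe2capital_alt word
instance (word : String) (out : String) : Decidable (Spec_apostrophe2capital word out) := by unfold Spec_apostrophe2capital; infer_instance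

-- ===== CLAIM (what is proved, stated in full; the proofs are below) =====
def Claim_equal_apostrophe2capital : Prop := ∀ (word : String), Dom_apostrophe2capital word → Spec_apostrophe2capital word (apostrophe2capital word)

-- ===== LEMMAS AND PROOFS =====

/-- Reference split on '`'. -/
def mySplit : List Char → List (List Char)
  | [] => [[]]
  | c :: r =>
    if c = '`' then [] :: mySplit r
    else
      match mySplit r with
      | [] => [[c]]
      | h :: t => (c :: h) :: t

theorem mySplit_ne_nil (l : List Char) : mySplit l ≠ [] := by
  cases l with
  | nil => simp [mySplit]
  | cons c r =>
    simp only [mySplit]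
    split_ifs
    · simp
    · cases h : mySplit r <;> simp

theorem go_eq (l : List Char) : ∀ (fuel : Nat), l.length ≤ fuel → ∀ (cur : List Char) (accs : List (List Char)),
    PySem.Chars.splitOn.go ['`'] fuel l cur accs =
      accs.reverse ++ ((cur.reverse ++ (mySplit l).headD []) :: (mySplit l).tail) := by
  induction l with
  | nil =>
    intro fuel _ cur accs
    cases fuel <;> simp [PySem.Chars.splitOn.go, mySplit]
  | cons c r ih =>
    intro fuel hf cur accs
    cases fuel with
    | zero => simp at hf
    | succ f =>
      simp only [List.length_cons, Nat.succ_le_succ_iff] at hf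
      by_cases hc : c = '`'
      · subst hc
        rw [show PySem.Chars.splitOn.go ['`'] (f+1) ('`' :: r) cur accs =
              PySem.Chars.splitOn.go ['`'] f r [] (cur.reverse :: accs) by
            simp [PySem.Chars.splitOn.go, List.isPrefixOf]]
        rw [ih f hf [] (cur.reverse :: accs)]
        have h := mySplit_ne_nil r
        cases hr : mySplit r with
        | nil => exact absurd hr h
        | cons h0 t0 => simp [mySplit, hr]
      · rw [show PySem.Chars.splitOn.go ['`'] (f+1) (c :: r) cur accs =
              PySem.Chars.splitOn.go ['`'] f r (c :: cur) accs by
            have h' : ('`' : Char) ≠ c := Ne.symm hc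
            simp [PySem.Chars.splitOn.go, List.isPrefixOf, h']]
        rw [ih f hf (c :: cur) accs]
        cases hr : mySplit r with
        | nil => exact absurd hr (mySplit_ne_nil r)
        | cons h0 t0 => simp [mySplit, hc, hr]

theorem splitOn_eq_mySplit (l : List Char) : PySem.Chars.splitOn l ['`'] = mySplit l := by
  rw [PySem.Chars.splitOn, go_eq l (l.length + 1) (Nat.le_succ _) [] []]
  cases hr : mySplit l with
  | nil => exact absurd hr (mySplit_ne_nil l)
  | cons h0 t0 => simp

/-- A's state machine, structurally. -/
def specA : List Char → Bool → List Char
  | [], _ => []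
  | c :: r, b =>
    if c = '`' then specA r true
    else (if b then PySem.Chars.upperChar c else c) :: specA r false

theorem foldA (l : List Char) : ∀ (res : String) (b : Bool),
    ((l.foldl
      (fun (st : String × Bool) letter =>
        if letter = '`' then (st.1, true)
        else
          let letter := if st.2 then PySem.Chars.upperChar letter else letter
          (st.1.push letter, false))
      (res, b)).1).toList = res.toList ++ specA l b := by
  induction l with
  | nil => intro res b; simp [specA]
  | cons c r ih =>
    intro res b
    by_cases hc : c = '`'
    · subst hc; simp [List.foldl, specA, ih]
    · simp [List.foldl, hc, specA, ih]

def joinCap (segs : List (List Char)) : List Char :=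
  PySem.Chars.join [] (segs.map pvCapFirst)

theorem join_nil_eq_flatten (parts : List (List Char)) :
    PySem.Chars.join [] parts = parts.flatten := by
  induction parts with
  | nil => simp [PySem.Chars.join, List.intercalate]
  | cons h t ih =>
    cases t with
    | nil => simp [PySem.Chars.join, List.intercalate]
    | cons h2 t2 =>
      simp only [PySem.Chars.join, List.intercalate] at *
      simp [List.intersperse, List.flatten] at *
      exact ih

theorem capFirst_cons (c : Char) (t : List Char) :
    pvCapFirst (c :: t) = PySem.Chars.upperChar c :: t := by
  simp [pvCapFirst, PySem.Chars.upper, PySem.List.slice, PySem.Chars.slice]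

theorem specA_eq (l : List Char) :
    (specA l false = (mySplit l).headD [] ++ joinCap (mySplit l).tail) ∧
    (specA l true = pvCapFirst ((mySplit l).headD []) ++ joinCap (mySplit l).tail) := by
  induction l with
  | nil => simp [specA, mySplit, joinCap, pvCapFirst, PySem.Chars.join, List.intercalate,
      PySem.Chars.upper, PySem.Chars.slice, PySem.List.slice]
  | cons c r ih =>
    by_cases hc : c = '`'
    · subst hc
      cases hr : mySplit r with
      | nil => exact absurd hr (mySplit_ne_nil r)
      | cons h0 t0 =>
        have h2 := ih.2
        rw [hr] at h2
        have hnil : pvCapFirst ([] : List Char) = [] := by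
          simp [pvCapFirst, PySem.Chars.upper, PySem.Chars.slice, PySem.List.slice]
        constructor
        · simp [mySplit, specA, h2, hr, joinCap, join_nil_eq_flatten]
        · simp [mySplit, specA, h2, hr, joinCap, hnil, join_nil_eq_flatten]
    · cases hr : mySplit r with
      | nil => exact absurd hr (mySplit_ne_nil r)
      | cons h0 t0 =>
        have h1 := ih.1
        rw [hr] at h1
        simp only [List.headD, List.tail] at h1
        constructor
        · simp [specA, hc, mySplit, hr, h1]
        · simp [specA, hc, mySplit, hr, h1, capFirst_cons]

-- ===== VERDICT (by name: the statement is the Claim_ definition above) =====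
theorem apostrophe2capital_spec : Claim_equal_apostrophe2capital := by
  intro word _
  unfold Spec_apostrophe2capital apostrophe2capital apostrophe2capital_alt
  apply String.toList_injective
  rw [foldA]
  rw [splitOn_eq_mySplit]
  have h := (specA_eq word.toList).1
  cases hr : mySplit word.toList with
  | nil => exact absurd hr (mySplit_ne_nil _)
  | cons h0 t0 =>
    rw [hr] at h
    simp [h, joinCap]
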